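-- pv_equiv track=rewrite | github.com/gilcu3/discretelog | discretelog/block_lanczos.py | spmul2
-- ===== SOURCE A (Python) =====
-- sparse_matrix = list[list[tuple[int, int]]]
--
-- vector = list[int]
--
-- def spmul2(mx: int, mat: sparse_matrix, vec: vector, q: int) -> vector:
--     n = len(mat)
--     nvec = [0] * n
--     xvec = vec[:]
--     bt = 63 - mx.bit_length() - 1
--     mask = (1 << bt) - 1
--     for b in range(0, q.bit_length() + 1, bt):
--         cvec = [v & mask for v in xvec]
--         for i in range(n):
--             a = 0
--             for j, v in mat[i]:
--                 a += cvec[j] * v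
--                 # assert abs(a) <= 1 << 63
--             nvec[i] += a << b
--         for i in range(len(xvec)):
--             xvec[i] >>= bt
--     return vmod(nvec, q)
--
-- def vmod(vec: vector, q: int) -> vector:
--     return [c % q for c in vec]
-- ===== SOURCE B (Python) =====
-- def spmul2(mx: int, mat, vec, q: int):
--     return [sum(v * vec[j] for j, v in row) % q for row in mat]
-- ===== Notes on version B (the rewrite author's own statement) =====
-- stated objective: simpler
-- what changed: B replaces A's bit-blocked outer loop (63-bit word masking, per-block dot products, shift-and-reassemble of partial sums) by one direct bignum dot product per row reduced mod q; Pre_ restricts vec to nonnegative entries below A's word bound 2^(62-mx.bit_length()) (the word-sized residue vectors the blocking is built for), and excludes q = 0 (ZeroDivisionError in vmod) and out-of-range column indices (IndexError).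
-- outside the precondition, e.g. on spmul2(3, [[(0, 1)]], [-1], 7): A returns [0], B returns [6]; on spmul2(2147483648, [[(0, 1)]], [1073741824], 7): A returns [0], B returns [1]; on spmul2(3, [[(0, 1)]], [1], 0): A raises ZeroDivisionError, B raises ZeroDivisionError
import Mathlib
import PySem

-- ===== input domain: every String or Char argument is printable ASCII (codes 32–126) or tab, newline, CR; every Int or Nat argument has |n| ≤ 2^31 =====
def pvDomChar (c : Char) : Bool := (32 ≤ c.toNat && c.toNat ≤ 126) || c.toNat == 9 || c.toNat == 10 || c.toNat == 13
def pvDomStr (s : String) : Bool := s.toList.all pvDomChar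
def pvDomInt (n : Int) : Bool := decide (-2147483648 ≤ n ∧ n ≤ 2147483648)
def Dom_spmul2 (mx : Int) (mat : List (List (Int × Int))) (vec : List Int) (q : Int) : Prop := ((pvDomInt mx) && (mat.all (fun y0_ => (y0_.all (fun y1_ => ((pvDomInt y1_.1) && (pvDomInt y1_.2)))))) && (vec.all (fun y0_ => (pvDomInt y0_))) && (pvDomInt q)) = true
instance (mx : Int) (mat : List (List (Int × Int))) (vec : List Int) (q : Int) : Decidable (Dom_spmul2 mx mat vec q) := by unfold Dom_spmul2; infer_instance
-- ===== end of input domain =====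

-- B drops A's bit-block outer loop (mask/shift word blocking) and computes each row as one
-- bignum dot product reduced mod q — simpler: one pass over the matrix instead of per-word passes.

-- ===== PORT A =====
-- helper vmod of the module
def vmod (vec : List Int) (q : Int) : List Int := vec.map (fun c => PySem.Int.mod c q)

-- 'a = 0; for j, v in mat[i]: a += cvec[j] * v'
def spmul2Dot (cvec : List Int) (row : List (Int × Int)) : Int :=
  row.foldl (fun a jv => a + PySem.List.pyGetD cvec jv.1 0 * jv.2) 0

-- 'for i in range(n): nvec[i] += a << b'   (b comes from range(0, …, bt), so b ≥ 0 and
-- '<< b' is exactly '<<< b.toNat')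
def spmul2Rows (mat : List (List (Int × Int))) (cvec : List Int) (b : Int) (nvec : List Int) : List Int :=
  (List.range mat.length).foldl
    (fun nv i => nv.set i (nv.getD i 0 + spmul2Dot cvec (mat.getD i []) <<< b.toNat)) nvec

-- one iteration of the outer 'for b in range(…)' loop: build cvec, update nvec, shift xvec
def spmul2Step (mat : List (List (Int × Int))) (mask : Int) (bt : Nat)
    (st : List Int × List Int) (b : Int) : List Int × List Int :=
  (spmul2Rows mat (st.2.map (fun v => PySem.Int.band v mask)) b st.1,
   st.2.map (fun v : Int => v >>> bt))

-- 'bt' as a Nat subtraction and '1 << bt' as a Nat shift: both equal to Python's values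
-- whenever bitLength mx ≤ 62, which holds on all of Dom_spmul2 (|mx| ≤ 2^31, bitLength ≤ 32)
def spmul2 (mx : Int) (mat : List (List (Int × Int))) (vec : List Int) (q : Int) : List Int :=
  let bt : Nat := 63 - PySem.Int.bitLength mx - 1
  let mask : Int := ((1 <<< bt : Nat) : Int) - 1
  let st := (PySem.List.pyRange 0 ((PySem.Int.bitLength q : Int) + 1) (bt : Int)).foldl
      (spmul2Step mat mask bt) (List.replicate mat.length 0, vec)
  vmod st.1 q

-- ===== PORT B =====
def spmul2_alt (mx : Int) (mat : List (List (Int × Int))) (vec : List Int) (q : Int) : List Int :=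
  mat.map (fun row =>
    PySem.Int.mod (row.foldl (fun a jv => a + jv.2 * PySem.List.pyGetD vec jv.1 0) 0) q)

-- ===== PRECONDITION & SPEC =====
-- Pre_ excludes q = 0 (ZeroDivisionError in vmod) and out-of-range column indices
-- (IndexError), and restricts vec to entries in [0, 2^bt) where bt = 62 - mx.bit_length()
-- is A's word size: the nonnegative word-sized residue vectors the bit blocking is built
-- for — on entries outside that window A's blocking reads only the low word bits of each
-- entry while B reads the full value, and neither reading is specified for such input.
def Pre_spmul2 (mx : Int) (mat : List (List (Int × Int))) (vec : List Int) (q : Int) : Prop :=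
  q ≠ 0 ∧ (∀ row ∈ mat, ∀ jv ∈ row, PySem.Raise.InRange vec.length jv.1)
    ∧ (∀ v ∈ vec, 0 ≤ v ∧ v < 2 ^ (63 - PySem.Int.bitLength mx - 1))
instance (mx : Int) (mat : List (List (Int × Int))) (vec : List Int) (q : Int) : Decidable (Pre_spmul2 mx mat vec q) := by unfold Pre_spmul2; infer_instance

def pvWitness_spmul2 : Int × (List (List (Int × Int))) × List Int × Int :=
  (3, [[(0, 2), (1, -1)], []], [5, 7], 11)

def Spec_spmul2 (mx : Int) (mat : List (List (Int × Int))) (vec : List Int) (q : Int) (out : List Int) : Prop := out = spmul2_alt mx mat vec q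
instance (mx : Int) (mat : List (List (Int × Int))) (vec : List Int) (q : Int) (out : List Int) : Decidable (Spec_spmul2 mx mat vec q out) := by unfold Spec_spmul2; infer_instance

-- ===== CLAIM (what is proved, stated in full; the proofs are below) =====
def Claim_equal_spmul2 : Prop := ∀ (mx : Int) (mat : List (List (Int × Int))) (vec : List Int) (q : Int), Dom_spmul2 mx mat vec q → Pre_spmul2 mx mat vec q → Spec_spmul2 mx mat vec q (spmul2 mx mat vec q)

-- ===== LEMMAS AND PROOFS =====

theorem pvWitness_ok :
    Dom_spmul2 pvWitness_spmul2.1 pvWitness_spmul2.2.1 pvWitness_spmul2.2.2.1 pvWitness_spmul2.2.2.2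
    ∧ Pre_spmul2 pvWitness_spmul2.1 pvWitness_spmul2.2.1 pvWitness_spmul2.2.2.1 pvWitness_spmul2.2.2.2 := by
  constructor <;> decide

-- on Dom, |mx| ≤ 2^31 bounds the bit length by 32
theorem bitLength_le_32 (mx : Int) (h1 : -2147483648 ≤ mx) (h2 : mx ≤ 2147483648) :
    PySem.Int.bitLength mx ≤ 32 := by
  by_cases hm : mx = 0
  · simp [hm]
  · by_contra h
    have hle := PySem.Int.two_pow_bitLength_le mx hm
    have habs : mx.natAbs ≤ 2 ^ 31 := by
      have : (2:Nat) ^ 31 = 2147483648 := by norm_num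
      omega
    have h32 : (2:Nat) ^ 32 ≤ 2 ^ (PySem.Int.bitLength mx - 1) :=
      Nat.pow_le_pow_right (by norm_num) (by omega)
    have : (2:Nat) ^ 31 < 2 ^ 32 := by norm_num
    omega

-- a positive-step pyRange from 0 with positive stop begins with 0
theorem pyRange_pos_head (L s : Int) (hL : 0 < L) (hs : 0 < s) :
    ∃ t, PySem.List.pyRange 0 L s = 0 :: t := by
  rw [PySem.List.pyRange_of_pos _ _ hs, if_pos (by omega : (0:Int) < L)]
  have h1 : 1 ≤ (L - 0 + s - 1) / s := by
    rw [Int.le_ediv_iff_mul_le hs]; omega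
  have hc : ((L - 0 + s - 1) / s).toNat ≠ 0 := by omega
  cases hcc : ((L - 0 + s - 1) / s).toNat with
  | zero => exact absurd hcc hc
  | succ m =>
    refine ⟨List.map ((fun k => 0 + s * (k:Int)) ∘ (fun n : Nat => n.succ)) (List.range m), ?_⟩
    rw [List.range_succ_eq_map, List.map_cons, List.map_map]
    norm_num

theorem band_mask_self (v : Int) (bt : Nat) (h0 : 0 ≤ v) (hv : v < 2 ^ bt) :
    PySem.Int.band v (((1 <<< bt : Nat) : Int) - 1) = v := by
  have hm : ((1 <<< bt : Nat) : Int) - 1 = ((2 ^ bt - 1 : Nat) : Int) := by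
    have h1 : (1:Nat) ≤ 2 ^ bt := Nat.one_le_two_pow
    simp only [Nat.shiftLeft_eq, Nat.one_mul]
    push_cast [h1]
    ring
  rw [hm, PySem.Int.band_of_nonneg h0 (by positivity)]
  have hp : ((2:Int))^bt = ((2^bt : Nat) : Int) := by push_cast; ring
  have hv' : v < ((2^bt : Nat) : Int) := by rw [← hp]; exact hv
  have hvn : v.toNat < 2 ^ bt := by omega
  have ht : ((2 ^ bt - 1 : Nat) : Int).toNat = 2 ^ bt - 1 := Int.toNat_natCast _
  rw [ht, Nat.and_two_pow_sub_one_of_lt_two_pow hvn]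
  omega

theorem shift_small_eq_zero (v : Int) (bt : Nat) (h0 : 0 ≤ v) (hv : v < 2 ^ bt) :
    v >>> bt = 0 := by
  rw [Int.shiftRight_eq_div_pow]
  apply Int.ediv_eq_zero_of_lt h0
  exact_mod_cast hv

-- indexing an all-zero list (any index, default 0) yields 0
theorem pyGetD_all_zero (cvec : List Int) (j : Int) (hc : ∀ x ∈ cvec, x = 0) :
    PySem.List.pyGetD cvec j 0 = 0 := by
  by_cases h : PySem.Raise.InRange cvec.length j
  · exact hc _ (PySem.List.pyGetD_mem cvec 0 h)
  · rw [PySem.List.pyGetD_of_none]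
    exact (PySem.List.pyGet?_eq_none_iff cvec j).mpr h

theorem dot_zero (cvec : List Int) (row : List (Int × Int)) (hc : ∀ x ∈ cvec, x = 0) :
    spmul2Dot cvec row = 0 := by
  unfold spmul2Dot
  suffices h : ∀ a : Int, row.foldl (fun a jv => a + PySem.List.pyGetD cvec jv.1 0 * jv.2) a = a from h 0
  induction row with
  | nil => intro a; rfl
  | cons jv row ih =>
      intro a
      simp only [List.foldl_cons, pyGetD_all_zero cvec jv.1 hc, zero_mul, add_zero]
      exact ih a

theorem rows_zero (mat : List (List (Int × Int))) (cvec : List Int) (b : Int) (nv : List Int)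
    (hc : ∀ x ∈ cvec, x = 0) (hn : mat.length ≤ nv.length) :
    spmul2Rows mat cvec b nv = nv := by
  unfold spmul2Rows
  have key : ∀ l : List Nat, (∀ i ∈ l, i < nv.length) →
      l.foldl (fun nv' i => nv'.set i (nv'.getD i 0 + spmul2Dot cvec (mat.getD i []) <<< b.toNat)) nv = nv := by
    intro l
    induction l with
    | nil => intro _; rfl
    | cons i l ih =>
        intro hmem
        have hi : i < nv.length := hmem i (by simp)
        have hstep : nv.set i (nv.getD i 0 + spmul2Dot cvec (mat.getD i []) <<< b.toNat) = nv := by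
          rw [dot_zero cvec _ hc, Int.zero_shiftLeft, add_zero, List.getD_eq_getElem nv 0 hi]
          exact List.set_getElem_self hi
        simp only [List.foldl_cons, hstep]
        exact ih (fun j hj => hmem j (by simp [hj]))
  exact key _ (fun i hi => lt_of_lt_of_le (List.mem_range.mp hi) hn)

-- the first block pass (b = 0) writes each row's dot product into the zero vector
theorem rows_fill (mat : List (List (Int × Int))) (cvec : List Int) :
    spmul2Rows mat cvec 0 (List.replicate mat.length 0) = mat.map (spmul2Dot cvec) := by
  unfold spmul2Rows
  have key : ∀ k ≤ mat.length,
      (List.range k).foldl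
        (fun nv i => nv.set i (nv.getD i 0 + spmul2Dot cvec (mat.getD i []) <<< (0:Int).toNat))
        (List.replicate mat.length 0)
      = (mat.take k).map (spmul2Dot cvec) ++ List.replicate (mat.length - k) 0 := by
    intro k
    induction k with
    | zero => intro _; simp
    | succ k ih =>
        intro hk
        have hk' : k < mat.length := by omega
        rw [List.range_succ, List.foldl_append, ih (by omega)]
        simp only [List.foldl_cons, List.foldl_nil]
        apply List.ext_getElem
        · simp; omega
        · intro i h1 h2
          have hlen : ((mat.take k).map (spmul2Dot cvec)).length = k := by
            simp [Nat.min_eq_left (le_of_lt hk')]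
          have hlen' : ((mat.take (k+1)).map (spmul2Dot cvec)).length = k+1 := by
            simp [Nat.min_eq_left hk']
          rw [List.length_append, hlen', List.length_replicate] at h2
          have hi : i < mat.length := by omega
          rw [List.getElem_set]
          by_cases hik : k = i
          · subst hik
            rw [if_pos rfl, List.getElem_append_left (by rw [hlen']; omega)]
            have hgd : ((mat.take k).map (spmul2Dot cvec) ++ List.replicate (mat.length - k) 0).getD k 0 = 0 := by
              rw [List.getD_eq_getElem _ _ (by rw [List.length_append, hlen, List.length_replicate]; omega),
                List.getElem_append_right (by omega)]
              simp
            rw [hgd, List.getElem_map, List.getElem_take]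
            simp [List.getElem?_eq_getElem hk']
          · rw [if_neg hik]
            by_cases hlt : i < k
            · rw [List.getElem_append_left (by omega), List.getElem_append_left (by omega)]
              simp [List.getElem_take]
            · rw [List.getElem_append_right (by rw [hlen]; omega), List.getElem_append_right (by rw [hlen']; omega)]
              simp
  have h := key mat.length (le_refl _)
  simpa using h

-- both row sums are the same fold up to commuting one multiplication
theorem dot_eq_alt (vec : List Int) (row : List (Int × Int)) :
    spmul2Dot vec row = row.foldl (fun a jv => a + jv.2 * PySem.List.pyGetD vec jv.1 0) 0 := by
  unfold spmul2Dot
  congr 1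
  funext a jv
  ring

-- ===== VERDICT (by name: the statement is the Claim_ definition above) =====
theorem spmul2_spec : Claim_equal_spmul2 := by
  intro mx mat vec q hdom hpre
  unfold Spec_spmul2
  obtain ⟨hq, hidx, hvec⟩ := hpre
  simp only [Dom_spmul2, pvDomInt, Bool.and_eq_true, decide_eq_true_eq] at hdom
  obtain ⟨⟨⟨⟨hmx1, hmx2⟩, _⟩, _⟩, _⟩ := hdom
  unfold spmul2
  dsimp only
  set bt : Nat := 63 - PySem.Int.bitLength mx - 1 with hbtdef
  have hbl : PySem.Int.bitLength mx ≤ 32 := bitLength_le_32 mx hmx1 hmx2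
  have hbtpos : (0:Int) < (bt : Int) := by
    have : 0 < bt := by omega
    exact_mod_cast this
  have hvbound : ∀ v ∈ vec, 0 ≤ v ∧ v < 2 ^ bt := hvec
  obtain ⟨t, ht⟩ := pyRange_pos_head ((PySem.Int.bitLength q : Int) + 1) (bt : Int)
    (by positivity) hbtpos
  rw [ht]
  simp only [List.foldl_cons]
  -- first iteration: cvec = vec, nvec = the row dot products, xvec becomes all zeros
  have hcvec : vec.map (fun v => PySem.Int.band v (((1 <<< bt : Nat) : Int) - 1)) = vec := by
    have h := List.map_congr_left (l := vec)
      (f := fun v => PySem.Int.band v (((1 <<< bt : Nat) : Int) - 1)) (g := fun v => v)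
      (fun v hv => band_mask_self v bt (hvbound v hv).1 (hvbound v hv).2)
    simpa using h
  have hxvec : ∀ x ∈ vec.map (fun v : Int => v >>> bt), x = 0 := by
    intro x hx
    obtain ⟨v, hv, rfl⟩ := List.mem_map.mp hx
    exact shift_small_eq_zero v bt (hvbound v hv).1 (hvbound v hv).2
  have hstep1 : spmul2Step mat (((1 <<< bt : Nat) : Int) - 1) bt (List.replicate mat.length 0, vec) 0
      = (mat.map (spmul2Dot vec), vec.map (fun v : Int => v >>> bt)) := by
    unfold spmul2Step
    simp only [hcvec]
    rw [rows_fill]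
  rw [hstep1]
  -- remaining iterations leave nvec unchanged
  have hrest : (t.foldl (spmul2Step mat (((1 <<< bt : Nat) : Int) - 1) bt)
      (mat.map (spmul2Dot vec), vec.map (fun v : Int => v >>> bt))).1 = mat.map (spmul2Dot vec) := by
    have key : ∀ (bs : List Int) (nv xv : List Int), (∀ x ∈ xv, x = 0) → mat.length ≤ nv.length →
        (bs.foldl (spmul2Step mat (((1 <<< bt : Nat) : Int) - 1) bt) (nv, xv)).1 = nv := by
      intro bs
      induction bs with
      | nil => intro nv xv _ _; rfl
      | cons b bs ih =>
          intro nv xv hxv hnv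
          have hcz : ∀ x ∈ xv.map (fun v => PySem.Int.band v (((1 <<< bt : Nat) : Int) - 1)), x = 0 := by
            intro x hx
            obtain ⟨v, hv, rfl⟩ := List.mem_map.mp hx
            rw [hxv v hv, PySem.Int.band_comm]
            simp
          have hxz : ∀ x ∈ xv.map (fun v : Int => v >>> bt), x = 0 := by
            intro x hx
            obtain ⟨v, hv, rfl⟩ := List.mem_map.mp hx
            rw [hxv v hv]
            simp
          simp only [List.foldl_cons]
          have hs : spmul2Step mat (((1 <<< bt : Nat) : Int) - 1) bt (nv, xv) b
              = (nv, xv.map (fun v : Int => v >>> bt)) := by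
            unfold spmul2Step
            simp only
            rw [rows_zero mat _ b nv hcz hnv]
          rw [hs]
          exact ih nv _ hxz hnv
    exact key t _ _ hxvec (by simp)
  rw [hrest]
  -- the final vmod equals B's per-row mod
  unfold vmod spmul2_alt
  rw [List.map_map]
  apply List.map_congr_left
  intro row _
  simp only [Function.comp]
  rw [dot_eq_alt]
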